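-- pv_equiv track=rewrite | github.com/ttzytt/PyAutoGrade | tests/ex2/tested_code/11/Unit 1/Cards/card_functions_review_1.py | uno_who_played_what
-- ===== SOURCE A (Python) =====
-- def uno_who_played_what(cards_played, num_players, starting_player):
--
--     if num_players <= 0 or type(num_players) is not int:
--         return None
--     if starting_player >= num_players  or starting_player < 0 or type(starting_player) is not int:
--         return None
--
--
--
--     skip_buffered_list = []
--     for i in range(len(cards_played)):
--         if cards_played[i] == 'skip':
--             skip_buffered_list.append('skip')
--             skip_buffered_list.append('buffer')
--         else:
--             skip_buffered_list.append(cards_played[i])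
--
--
--     is_clockwise = True
--     hands = []
--     for x in range(num_players):
--         hands.append([])
--
--
--     if starting_player == 0:
--         last_selected_hand = len(hands) - 1
--     else:
--         last_selected_hand = starting_player - 1
--
--
--     for i in range(len(skip_buffered_list)):
--
--         if is_clockwise:
--             last_selected_hand += 1
--         else:
--             last_selected_hand -=1
--         last_selected_hand = last_selected_hand % num_players
--
--         hands[last_selected_hand].append(skip_buffered_list[i])
--
--         if skip_buffered_list[i] == 'reverse':
--             is_clockwise = not is_clockwise
--
--
--     for hand in range(len(hands)):
--         unbuffered_hand = []
--         for card in range(len(hands[hand])):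
--             if not hands[hand][card] == 'buffer':
--                 unbuffered_hand.append(hands[hand][card])
--         hands[hand] = unbuffered_hand
--     return hands
-- ===== SOURCE B (Python) =====
-- def uno_who_played_what(cards_played, num_players, starting_player):
--     if num_players <= 0 or type(num_players) is not int:
--         return None
--     if starting_player >= num_players or starting_player < 0 or type(starting_player) is not int:
--         return None
--     hands = [[] for _ in range(num_players)]
--     cur = (starting_player - 1) % num_players
--     step = 1
--     for card in cards_played:
--         cur = (cur + step) % num_players
--         hands[cur].append(card)
--         if card == 'reverse':
--             step = -step
--         elif card == 'skip':
--             cur = (cur + step) % num_players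
--     return hands
-- ===== Notes on version B (the rewrite author's own statement) =====
-- stated objective: simpler
-- what changed: B replaces A's three-phase simulation (expanding each 'skip' into skip+marker into an auxiliary list, dealing that list, then a nested pass stripping the markers) by one pass over cards_played that tracks the current player and direction directly, advancing an extra seat on 'skip'; Pre_ excludes decks that contain the literal string 'buffer' (with the player guards passing), which is not a UNO card but A's internal skip-marker, so on such decks the marker collides with a real card and either behaviour (A drops them, B deals them) is defensible.
-- outside the precondition, e.g. on uno_who_played_what(['buffer'], 2, 0): A returns [[], []], B returns [['buffer'], []]
import Mathlib
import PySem

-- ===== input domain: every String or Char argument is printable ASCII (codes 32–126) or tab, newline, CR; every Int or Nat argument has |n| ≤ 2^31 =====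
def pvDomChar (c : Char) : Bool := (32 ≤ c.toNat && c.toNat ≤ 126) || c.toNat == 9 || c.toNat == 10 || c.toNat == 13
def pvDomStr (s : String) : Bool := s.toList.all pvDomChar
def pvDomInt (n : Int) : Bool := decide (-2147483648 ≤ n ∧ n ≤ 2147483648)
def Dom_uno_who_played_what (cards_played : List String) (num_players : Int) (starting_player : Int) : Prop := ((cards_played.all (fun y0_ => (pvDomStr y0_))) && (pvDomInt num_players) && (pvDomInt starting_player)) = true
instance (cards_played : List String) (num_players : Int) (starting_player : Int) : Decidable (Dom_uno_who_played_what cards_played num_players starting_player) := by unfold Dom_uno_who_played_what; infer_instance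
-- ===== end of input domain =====

-- B replaces A's three-phase simulation (skip-marker expansion, deal loop, marker-stripping pass)
-- by a single pass over cards_played that moves the current player directly (objective: simpler);
-- decks containing the reserved marker string 'buffer' (with the guards passing) are excluded by Pre_ below.

-- ===== PORT A =====
-- one iteration of A's dealing loop over the skip-buffered list; state = (is_clockwise, hands, last_selected_hand)
def pvStepA (num_players : Int) (st : Bool × List (List String) × Int) (c : String) : Bool × List (List String) × Int :=
  let last1 : Int := if st.1 then st.2.2 + 1 else st.2.2 - 1
  let last2 : Int := PySem.Int.mod last1 num_players
  let hands' := st.2.1.modify last2.toNat (fun h => h ++ [c])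
  (if c = "reverse" then !st.1 else st.1, hands', last2)

-- A's final stripping of 'buffer' cards from one hand
def pvUnbuffer (h : List String) : List String :=
  h.foldl (fun acc c => if ¬ (c = "buffer") then acc ++ [c] else acc) []

def uno_who_played_what (cards_played : List String) (num_players : Int) (starting_player : Int) : Option (List (List String)) :=
  if num_players ≤ 0 then none
  else if starting_player ≥ num_players ∨ starting_player < 0 then none
  else
    let skip_buffered_list := cards_played.foldl
      (fun acc c => if c = "skip" then (acc ++ ["skip"]) ++ ["buffer"] else acc ++ [c]) []
    let hands : List (List String) :=
      (PySem.List.pyRange 0 num_players 1).foldl (fun h _ => h ++ [([] : List String)]) []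
    let last0 : Int := if starting_player = 0 then (hands.length : Int) - 1 else starting_player - 1
    let fin := skip_buffered_list.foldl (pvStepA num_players) (true, hands, last0)
    some (fin.2.1.map pvUnbuffer)

-- ===== PORT B =====
-- one iteration of B's single pass; state = (current_player, step (+1/-1), hands)
def pvStepB (num_players : Int) (st : Int × Int × List (List String)) (card : String) : Int × Int × List (List String) :=
  let cur : Int := PySem.Int.mod (st.1 + st.2.1) num_players
  let hands' := st.2.2.modify cur.toNat (fun h => h ++ [card])
  if card = "reverse" then (cur, -st.2.1, hands')
  else if card = "skip" then (PySem.Int.mod (cur + st.2.1) num_players, st.2.1, hands')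
  else (cur, st.2.1, hands')

def uno_who_played_what_alt (cards_played : List String) (num_players : Int) (starting_player : Int) : Option (List (List String)) :=
  if num_players ≤ 0 then none
  else if starting_player ≥ num_players ∨ starting_player < 0 then none
  else
    let hands : List (List String) := List.replicate num_players.toNat []
    let fin := cards_played.foldl (pvStepB num_players)
      (PySem.Int.mod (starting_player - 1) num_players, 1, hands)
    some fin.2.2

-- ===== PRECONDITION & SPEC =====
-- Pre_ excludes decks that contain the literal string 'buffer' while the player guards pass: it is
-- not a UNO card but A's internal skip-marker, so on such decks the marker collides with a real card
-- and no behaviour is specified (A silently drops those cards, B deals them like any other card).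
def Pre_uno_who_played_what (cards_played : List String) (num_players : Int) (starting_player : Int) : Prop :=
  ¬ ("buffer" ∈ cards_played ∧ 0 < num_players ∧ 0 ≤ starting_player ∧ starting_player < num_players)
instance (cards_played : List String) (num_players : Int) (starting_player : Int) : Decidable (Pre_uno_who_played_what cards_played num_players starting_player) := by unfold Pre_uno_who_played_what; infer_instance

def pvWitness_uno_who_played_what : List String × Int × Int := (["red 5", "skip", "reverse", "blue 2"], 3, 1)

def Spec_uno_who_played_what (cards_played : List String) (num_players : Int) (starting_player : Int) (out : Option (List (List String))) : Prop := out = uno_who_played_what_alt cards_played num_players starting_player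
instance (cards_played : List String) (num_players : Int) (starting_player : Int) (out : Option (List (List String))) : Decidable (Spec_uno_who_played_what cards_played num_players starting_player out) := by unfold Spec_uno_who_played_what; infer_instance

-- ===== CLAIM (what is proved, stated in full; the proofs are below) =====
def Claim_equal_uno_who_played_what : Prop := ∀ (cards_played : List String) (num_players : Int) (starting_player : Int), Dom_uno_who_played_what cards_played num_players starting_player → Pre_uno_who_played_what cards_played num_players starting_player → Spec_uno_who_played_what cards_played num_players starting_player (uno_who_played_what cards_played num_players starting_player)

-- ===== LEMMAS AND PROOFS =====

-- the per-card expansion A performs when building skip_buffered_list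
def pvExpand (c : String) : List String := if c = "skip" then ["skip", "buffer"] else [c]

theorem pvUnbuffer_append (h : List String) (c : String) :
    pvUnbuffer (h ++ [c]) = pvUnbuffer h ++ (if c = "buffer" then [] else [c]) := by
  unfold pvUnbuffer
  rw [List.foldl_append]
  by_cases hc : c = "buffer" <;> simp [hc]

theorem pvModify_id {α : Type} (l : List α) (i : Nat) :
    l.modify i (fun x => x) = l := by
  induction l generalizing i with
  | nil => simp
  | cons x rest ih =>
    cases i with
    | zero => simp [List.modify_cons]
    | succ n => simp [List.modify_cons, ih n]

theorem pvMap_modify {α β : Type} (f : α → β) (g : α → α) (g' : β → β)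
    (hfg : ∀ x, f (g x) = g' (f x)) (l : List α) (i : Nat) :
    (l.modify i g).map f = (l.map f).modify i g' := by
  induction l generalizing i with
  | nil => simp
  | cons x rest ih =>
    cases i with
    | zero => simp [List.modify_cons, hfg]
    | succ n => simp [List.modify_cons, ih n]

theorem pvMU_buf (l : List (List String)) (i : Nat) :
    (l.modify i (fun h => h ++ ["buffer"])).map pvUnbuffer = l.map pvUnbuffer := by
  rw [pvMap_modify pvUnbuffer _ (fun x => x)
    (by intro x; rw [pvUnbuffer_append]; simp)]
  exact pvModify_id _ i

theorem pvMU_ne (l : List (List String)) (i : Nat) (c : String) (hc : ¬ c = "buffer") :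
    (l.modify i (fun h => h ++ [c])).map pvUnbuffer
      = (l.map pvUnbuffer).modify i (fun h => h ++ [c]) :=
  pvMap_modify pvUnbuffer _ _ (by intro x; rw [pvUnbuffer_append, if_neg hc]) l i

theorem pvLoop_inv (n : Int) (hn : 0 < n) (cards : List String)
    (hnb : ∀ c ∈ cards, ¬ c = "buffer") :
    ∀ (cw : Bool) (hands : List (List String)) (last : Int),
    0 ≤ last → last < n →
    (cards.foldl (pvStepB n) (last, (if cw then 1 else -1), hands.map pvUnbuffer)
       = (((cards.flatMap pvExpand).foldl (pvStepA n) (cw, hands, last)).2.2,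
          (if ((cards.flatMap pvExpand).foldl (pvStepA n) (cw, hands, last)).1 then 1 else -1),
          ((cards.flatMap pvExpand).foldl (pvStepA n) (cw, hands, last)).2.1.map pvUnbuffer))
    ∧ 0 ≤ ((cards.flatMap pvExpand).foldl (pvStepA n) (cw, hands, last)).2.2
    ∧ ((cards.flatMap pvExpand).foldl (pvStepA n) (cw, hands, last)).2.2 < n := by
  induction cards with
  | nil => intro cw hands last h0 h1; exact ⟨rfl, h0, h1⟩
  | cons c rest ih =>
    intro cw hands last h0 h1
    have hbf : ¬ c = "buffer" := hnb c (List.mem_cons_self ..)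
    have ih := ih (fun x hx => hnb x (List.mem_cons_of_mem _ hx))
    simp only [List.flatMap_cons, List.foldl_append, List.foldl_cons]
    by_cases hsk : c = "skip"
    · subst hsk
      cases cw with
      | true =>
        simp only [pvExpand, pvStepA, pvStepB, List.foldl_cons, List.foldl_nil,
          if_pos rfl, if_true,
          show ¬("skip" : String) = "reverse" by decide,
          show ¬("buffer" : String) = "reverse" by decide, if_false]
        have key := ih true
          ((hands.modify (PySem.Int.mod (last + 1) n).toNat (fun h => h ++ ["skip"])).modify
            (PySem.Int.mod (PySem.Int.mod (last + 1) n + 1) n).toNat (fun h => h ++ ["buffer"]))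
          (PySem.Int.mod (PySem.Int.mod (last + 1) n + 1) n)
          (PySem.Int.mod_nonneg _ hn) (PySem.Int.mod_lt _ hn)
        rw [pvMU_buf, pvMU_ne _ _ _ (by decide), if_pos rfl] at key
        exact key
      | false =>
        simp only [pvExpand, pvStepA, pvStepB, List.foldl_cons, List.foldl_nil,
          if_pos rfl, if_neg (by decide : ¬(false = true)),
          show ¬("skip" : String) = "reverse" by decide,
          show ¬("buffer" : String) = "reverse" by decide, if_false,
          show ∀ a : Int, a + -1 = a - 1 from fun a => by ring]
        have key := ih false
          ((hands.modify (PySem.Int.mod (last - 1) n).toNat (fun h => h ++ ["skip"])).modify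
            (PySem.Int.mod (PySem.Int.mod (last - 1) n - 1) n).toNat (fun h => h ++ ["buffer"]))
          (PySem.Int.mod (PySem.Int.mod (last - 1) n - 1) n)
          (PySem.Int.mod_nonneg _ hn) (PySem.Int.mod_lt _ hn)
        rw [pvMU_buf, pvMU_ne _ _ _ (by decide),
          if_neg (by decide : ¬(false = true))] at key
        exact key
    · by_cases hrv : c = "reverse"
      · subst hrv
        cases cw with
        | true =>
          simp only [pvExpand, pvStepA, pvStepB, List.foldl_cons, List.foldl_nil,
            if_pos rfl, if_true,
            show ¬("reverse" : String) = "skip" by decide, if_false]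
          have key := ih false
            (hands.modify (PySem.Int.mod (last + 1) n).toNat (fun h => h ++ ["reverse"]))
            (PySem.Int.mod (last + 1) n)
            (PySem.Int.mod_nonneg _ hn) (PySem.Int.mod_lt _ hn)
          rw [pvMU_ne _ _ _ (by decide), if_neg (by decide : ¬(false = true))] at key
          simp only [Bool.not_true]
          exact key
        | false =>
          simp only [pvExpand, pvStepA, pvStepB, List.foldl_cons, List.foldl_nil,
            if_pos rfl, if_neg (by decide : ¬(false = true)),
            show ¬("reverse" : String) = "skip" by decide, if_false,
            show ∀ a : Int, a + -1 = a - 1 from fun a => by ring, neg_neg]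
          have key := ih true
            (hands.modify (PySem.Int.mod (last - 1) n).toNat (fun h => h ++ ["reverse"]))
            (PySem.Int.mod (last - 1) n)
            (PySem.Int.mod_nonneg _ hn) (PySem.Int.mod_lt _ hn)
          rw [pvMU_ne _ _ _ (by decide), if_pos rfl] at key
          simp only [Bool.not_false]
          exact key
      · cases cw with
        | true =>
          simp only [pvExpand, pvStepA, pvStepB, List.foldl_cons, List.foldl_nil,
            if_neg hsk, if_neg hrv, if_true, if_pos rfl]
          have key := ih true
            (hands.modify (PySem.Int.mod (last + 1) n).toNat (fun h => h ++ [c]))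
            (PySem.Int.mod (last + 1) n)
            (PySem.Int.mod_nonneg _ hn) (PySem.Int.mod_lt _ hn)
          rw [pvMU_ne _ _ _ hbf, if_pos rfl] at key
          exact key
        | false =>
          simp only [pvExpand, pvStepA, pvStepB, List.foldl_cons, List.foldl_nil,
            if_neg hsk, if_neg hrv, if_neg (by decide : ¬(false = true)),
            show ∀ a : Int, a + -1 = a - 1 from fun a => by ring]
          have key := ih false
            (hands.modify (PySem.Int.mod (last - 1) n).toNat (fun h => h ++ [c]))
            (PySem.Int.mod (last - 1) n)
            (PySem.Int.mod_nonneg _ hn) (PySem.Int.mod_lt _ hn)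
          rw [pvMU_ne _ _ _ hbf, if_neg (by decide : ¬(false = true))] at key
          exact key

theorem pvSbl_eq (cards : List String) (acc : List String) :
    cards.foldl (fun acc c => if c = "skip" then (acc ++ ["skip"]) ++ ["buffer"] else acc ++ [c]) acc
      = acc ++ cards.flatMap pvExpand := by
  induction cards generalizing acc with
  | nil => simp
  | cons c rest ih =>
    simp only [List.foldl_cons, List.flatMap_cons]
    by_cases hc : c = "skip"
    · rw [if_pos hc, ih, hc]; simp [pvExpand]
    · rw [if_neg hc, ih]; simp [pvExpand, hc]

theorem pvHandsInit_eq (l : List Int) (acc : List (List String)) :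
    l.foldl (fun h _ => h ++ [([] : List String)]) acc = acc ++ List.replicate l.length [] := by
  induction l generalizing acc with
  | nil => simp
  | cons x rest ih => simp [ih, List.replicate_succ, List.append_assoc]

-- ===== VERDICT (by name: the statements are the Claim_ definitions above) =====
theorem uno_who_played_what_spec : Claim_equal_uno_who_played_what := by
  intro cards n sp _ hpre
  unfold Spec_uno_who_played_what uno_who_played_what uno_who_played_what_alt
  by_cases h1 : n ≤ 0
  · simp [h1]
  · rw [if_neg h1, if_neg h1]
    by_cases h2 : sp ≥ n ∨ sp < 0
    · simp [h2]
    · rw [if_neg h2, if_neg h2]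
      push_neg at h1 h2
      obtain ⟨hsp1, hsp2⟩ := h2
      have hnb : ∀ c ∈ cards, ¬ c = "buffer" := by
        intro c hc hceq
        exact hpre ⟨hceq ▸ hc, h1, hsp2, hsp1⟩
      simp only
      rw [pvSbl_eq cards [], pvHandsInit_eq, List.nil_append, List.nil_append,
        PySem.List.length_pyRange_one]
      have hlen : ((List.replicate (n - 0).toNat ([] : List String)).length : Int) = n := by
        simp; omega
      rw [hlen]
      have hlast : (if sp = 0 then n - 1 else sp - 1) = PySem.Int.mod (sp - 1) n := by
        by_cases hs0 : sp = 0
        · subst hs0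
          rw [if_pos rfl, PySem.Int.mod_eq_emod_of_pos h1,
            show (0 - 1 : Int) = n - 1 - n by ring, Int.sub_emod_right,
            Int.emod_eq_of_lt (by omega) (by omega)]
        · rw [if_neg hs0, PySem.Int.mod_eq_emod_of_pos h1, Int.emod_eq_of_lt (by omega) (by omega)]
      have hinv := pvLoop_inv n h1 cards hnb true (List.replicate (n - 0).toNat ([] : List String))
        (PySem.Int.mod (sp - 1) n) (PySem.Int.mod_nonneg _ h1) (PySem.Int.mod_lt _ h1)
      have hmapinit : (List.replicate (n - 0).toNat ([] : List String)).map pvUnbuffer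
          = List.replicate (n - 0).toNat ([] : List String) := by
        simp [pvUnbuffer]
      rw [hmapinit, if_pos rfl] at hinv
      have hn0 : (n - 0).toNat = n.toNat := by omega
      rw [hlast]
      simp only [hn0] at hinv ⊢
      rw [hinv.1]
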